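-- pv_equiv track=rewrite | github.com/Aarav0Maz/CCC_2019 | J4.py | flipper
-- ===== SOURCE A (Python) =====
-- def flipper(operations):
--     grid = [[1, 2], [3, 4]]
--
--     for op in operations:
--         if op == 'H':
--             # Horizontal flip
--             grid = [grid[1], grid[0]]
--         elif op == 'V':
--             # Vertical flip
--             new_grid = []
--             for row in grid:
--                 new_grid.append(row[::-1])
--             grid = new_grid
--
--     return grid
-- ===== SOURCE B (Python) =====
-- def flipper(operations):
--     h = False
--     v = False
--     for op in operations:
--         if op == 'H':
--             h = not h
--         elif op == 'V':
--             v = not v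
--     if h:
--         return [[4, 3], [2, 1]] if v else [[3, 4], [1, 2]]
--     else:
--         return [[2, 1], [4, 3]] if v else [[1, 2], [3, 4]]
-- ===== Notes on version B (the rewrite author's own statement) =====
-- stated objective: simpler
-- what changed: Replaces step-by-step grid mutation with two parity bits toggled per 'H'/'V' and a closed-form four-way selection of the final grid.
import Mathlib
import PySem

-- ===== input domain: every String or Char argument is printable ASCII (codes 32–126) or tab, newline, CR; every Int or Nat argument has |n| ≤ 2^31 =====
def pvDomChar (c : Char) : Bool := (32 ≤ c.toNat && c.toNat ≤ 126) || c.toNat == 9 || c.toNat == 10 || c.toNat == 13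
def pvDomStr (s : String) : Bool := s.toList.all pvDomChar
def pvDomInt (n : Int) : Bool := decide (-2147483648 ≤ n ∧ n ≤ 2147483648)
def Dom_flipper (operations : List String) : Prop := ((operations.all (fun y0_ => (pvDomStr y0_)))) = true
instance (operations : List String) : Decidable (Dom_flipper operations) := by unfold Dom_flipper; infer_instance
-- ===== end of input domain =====

-- B replaces A's step-by-step grid mutation by two toggled parity bits and a closed-form four-way result (objective: simpler).


-- ===== PORT A =====
-- grid = [grid[1], grid[0]] : grid always has exactly 2 rows, so pyGet?.getD [] is exact here.
def flipperStep (grid : List (List Int)) (op : String) : List (List Int) :=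
  if op = "H" then
    [(PySem.List.pyGet? grid 1).getD [], (PySem.List.pyGet? grid 0).getD []]
  else if op = "V" then
    -- new_grid.append(row[::-1]) loop; row[::-1] via slice? with step -1 (never none since step ≠ 0)
    grid.foldl (fun new_grid row => new_grid ++ [(PySem.List.slice? row none none (-1)).getD []]) []
  else grid

def flipper (operations : List String) : List (List Int) :=
  operations.foldl flipperStep [[1, 2], [3, 4]]

-- ===== PORT B =====
def flipperAltStep (hv : Bool × Bool) (op : String) : Bool × Bool :=
  if op = "H" then (!hv.1, hv.2)
  else if op = "V" then (hv.1, !hv.2)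
  else hv

def flipper_alt (operations : List String) : List (List Int) :=
  let hv := operations.foldl flipperAltStep (false, false)
  if hv.1 then
    if hv.2 then [[4, 3], [2, 1]] else [[3, 4], [1, 2]]
  else
    if hv.2 then [[2, 1], [4, 3]] else [[1, 2], [3, 4]]

-- ===== PRECONDITION & SPEC =====
def Spec_flipper (operations : List String) (out : List (List Int)) : Prop := out = flipper_alt operations
instance (operations : List String) (out : List (List Int)) : Decidable (Spec_flipper operations out) := by unfold Spec_flipper; infer_instance

-- ===== CLAIM (what is proved, stated in full; the proofs are below) =====
def Claim_equal_flipper : Prop := ∀ (operations : List String), Dom_flipper operations → Spec_flipper operations (flipper operations)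

-- ===== LEMMAS AND PROOFS =====
-- the grid corresponding to a pair of parity bits
def pvPick (h v : Bool) : List (List Int) :=
  if h then
    if v then [[4, 3], [2, 1]] else [[3, 4], [1, 2]]
  else
    if v then [[2, 1], [4, 3]] else [[1, 2], [3, 4]]

theorem pvStep_pick (h v : Bool) (op : String) :
    flipperStep (pvPick h v) op = pvPick (flipperAltStep (h, v) op).1 (flipperAltStep (h, v) op).2 := by
  unfold flipperStep flipperAltStep
  by_cases hH : op = "H" <;> by_cases hV : op = "V" <;>
    simp [hH, hV] <;> cases h <;> cases v <;> decide

theorem pvFold_pick (operations : List String) (h v : Bool) :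
    operations.foldl flipperStep (pvPick h v)
      = pvPick (operations.foldl flipperAltStep (h, v)).1 (operations.foldl flipperAltStep (h, v)).2 := by
  induction operations generalizing h v with
  | nil => rfl
  | cons op rest ih =>
      simp only [List.foldl_cons, pvStep_pick]
      exact ih _ _

-- ===== VERDICT (by name: the statement is the Claim_ definition above) =====
theorem flipper_spec : Claim_equal_flipper := by
  intro operations _
  show flipper operations = flipper_alt operations
  have := pvFold_pick operations false false
  simpa [flipper, flipper_alt, pvPick] using this
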